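-- pv_equiv track=rewrite | github.com/Drachier/PyTreeNet | pytreenet/ttno/ttno.py | _find_new_leg_dict
-- ===== SOURCE A (Python) =====
-- def _find_new_leg_dict(leg_dict, c=0):
--     """
--     Used to find the Dictionary corresponding to the new tensor created
--     in the R-part of the QR-decomposition
--
--     Parameters
--     ----------
--     leg_dict : dict
--         Subdictionary of leg_dict. Keys are node_ids and the values are
--         leg indices of open legs of the tensor in the current node, before
--         QR-decomposition
--     c : int
--         Shift when finding leg dict for non-root node. Set `c` to 1 to avoid adding
--         leg connected to parent node to updated leg dict.
--
--     Returns
--     -------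
--     new_leg_dict: dict
--         Keys are node_ids and the values are leg indices of open legs in
--         the newly obtained tensor node.
--
--     """
--
--     half_leg = len(leg_dict)
--     new_leg_dict = {}
--
--     count = 0
--     while len(leg_dict) > 0:
--         key_w_min_index = ""
--         min_index = float("inf")
--
--         for node_id in leg_dict:
--             if leg_dict[node_id][0] < min_index:
--                 key_w_min_index = node_id
--                 min_index = leg_dict[node_id][0]
--
--         # Every node will have two open legs belonging to the
--         # same other node are exactly half_leg apart.
--         new_leg_dict[key_w_min_index] = [c + count, c + count + half_leg]
--
--         count += 1
--
--         del leg_dict[key_w_min_index]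
--
--     return new_leg_dict
-- ===== SOURCE B (Python) =====
-- def _find_new_leg_dict(leg_dict, c=0):
--     # Stable-sort the items once by their first leg index, then assign
--     # consecutive counts in that order (A re-scans for the minimum each round).
--     half_leg = len(leg_dict)
--     order = sorted(leg_dict.items(), key=lambda kv: kv[1][0])
--     leg_dict.clear()  # A deletes every key of leg_dict in place; do the same
--     return {key: [c + i, c + i + half_leg] for i, (key, _val) in enumerate(order)}
-- ===== Notes on version B (the rewrite author's own statement) =====
-- stated objective: faster
-- what changed: A repeatedly scans the remaining dict for the key with minimal first leg index and deletes it (selection sort, quadratic); B stable-sorts the items once by value[0] and assigns the sequential indices in one enumerate pass.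
import Mathlib
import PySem

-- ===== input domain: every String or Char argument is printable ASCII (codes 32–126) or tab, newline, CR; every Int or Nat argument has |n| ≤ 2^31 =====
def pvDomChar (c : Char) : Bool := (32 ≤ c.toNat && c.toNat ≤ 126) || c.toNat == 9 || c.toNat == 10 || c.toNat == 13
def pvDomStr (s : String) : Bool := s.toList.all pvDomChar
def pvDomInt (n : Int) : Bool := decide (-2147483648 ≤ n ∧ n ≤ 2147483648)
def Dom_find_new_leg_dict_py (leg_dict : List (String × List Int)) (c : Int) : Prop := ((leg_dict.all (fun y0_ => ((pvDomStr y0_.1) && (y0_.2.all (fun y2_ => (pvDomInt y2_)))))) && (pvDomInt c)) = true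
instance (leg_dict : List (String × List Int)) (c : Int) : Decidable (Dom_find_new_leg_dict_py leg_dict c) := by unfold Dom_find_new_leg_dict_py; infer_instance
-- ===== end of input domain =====

-- B replaces A's quadratic repeated min-scan-and-delete with one stable sort by value[0]
-- plus an enumerate pass (asymptotically faster); return value only — the Python A deletes
-- every key of its dict argument in place and the Python B matches that with leg_dict.clear().


-- ===== PORT A =====
-- leg_dict[node_id][0]: inside Pre_ every dict value has a first element, so a default-0 read is exact
def pvKey (kv : String × List Int) : Int := PySem.List.pyGetD kv.2 0 0

-- the inner 'for node_id in leg_dict' scan; state = (key_w_min_index, min_index),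
-- min_index = none models float("inf") (every int is < inf).  Keys of a dict are unique,
-- so leg_dict[node_id] is the iterated entry's own value.
def pvScanStep (best : String × Option Int) (p : String × List Int) : String × Option Int :=
  match best.2 with
  | none => (p.1, some (pvKey p))
  | some m => if pvKey p < m then (p.1, some (pvKey p)) else best

def pvScanMin (pending : List (String × List Int)) : String × Option Int :=
  pending.foldl pvScanStep ("", none)

-- 'del leg_dict[key_w_min_index]': remove the (unique) entry with that key
def pvEraseKey : List (String × List Int) → String → List (String × List Int)
  | [], _ => []
  | p :: rest, k => if p.1 = k then rest else p :: pvEraseKey rest k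

-- the 'while len(leg_dict) > 0' loop; fuel = initial size makes it total (each round deletes
-- one entry).  new_leg_dict only ever receives fresh keys, so dict insertion is list append.
def pvLoopA : Nat → List (String × List Int) → List (String × List Int) → Int → Int → Int → List (String × List Int)
  | 0, _, acc, _, _, _ => acc
  | fuel+1, pending, acc, half, c, count =>
    if pending.isEmpty then acc
    else
      pvLoopA fuel (pvEraseKey pending (pvScanMin pending).1)
        (acc ++ [((pvScanMin pending).1, [c + count, c + count + half])]) half c (count + 1)

def find_new_leg_dict_py (leg_dict : List (String × List Int)) (c : Int) : List (String × List Int) :=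
  let items := (PySem.Dict.ofList leg_dict).items
  pvLoopA items.length items [] (items.length : Int) c 0

-- ===== PORT B =====
def find_new_leg_dict_py_alt (leg_dict : List (String × List Int)) (c : Int) : List (String × List Int) :=
  let items := (PySem.Dict.ofList leg_dict).items
  (PySem.List.enumerate (PySem.List.sorted items pvKey false) 0).map
    (fun p => (p.2.1, [c + p.1, c + p.1 + (items.length : Int)]))

-- ===== PRECONDITION & SPEC =====
-- Pre_ excludes exactly the inputs on which the Python A raises IndexError:
-- some dict value has no elements, so leg_dict[node_id][0] fails.
def Pre_find_new_leg_dict_py (leg_dict : List (String × List Int)) (c : Int) : Prop :=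
  ∀ v ∈ (PySem.Dict.ofList leg_dict).values, v ≠ []
instance (leg_dict : List (String × List Int)) (c : Int) : Decidable (Pre_find_new_leg_dict_py leg_dict c) := by unfold Pre_find_new_leg_dict_py; infer_instance
def pvWitness_find_new_leg_dict_py : (List (String × List Int)) × Int := ([("a", [1]), ("b", [0, 3])], 0)
def Spec_find_new_leg_dict_py (leg_dict : List (String × List Int)) (c : Int) (out : List (String × List Int)) : Prop := out = find_new_leg_dict_py_alt leg_dict c
instance (leg_dict : List (String × List Int)) (c : Int) (out : List (String × List Int)) : Decidable (Spec_find_new_leg_dict_py leg_dict c out) := by unfold Spec_find_new_leg_dict_py; infer_instance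

-- ===== CLAIM (what is proved, stated in full; the proofs are below) =====
def Claim_equal_find_new_leg_dict_py : Prop := ∀ (leg_dict : List (String × List Int)) (c : Int), Dom_find_new_leg_dict_py leg_dict c → Pre_find_new_leg_dict_py leg_dict c → Spec_find_new_leg_dict_py leg_dict c (find_new_leg_dict_py leg_dict c)

-- ===== LEMMAS AND PROOFS =====

-- first entry attaining the minimal pvKey (ties: earliest wins), as a running fold
def pvFm (l : List (String × List Int)) (b : String × List Int) : String × List Int :=
  l.foldl (fun best p => if pvKey p < pvKey best then p else best) b

theorem pvScan_eq_fm (l : List (String × List Int)) : ∀ b : String × List Int,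
    l.foldl pvScanStep (b.1, some (pvKey b)) = ((pvFm l b).1, some (pvKey (pvFm l b))) := by
  induction l with
  | nil => intro b; simp [pvFm]
  | cons p t ih =>
    intro b
    simp only [pvFm, List.foldl_cons, pvScanStep]
    by_cases h : pvKey p < pvKey b
    · simp [h, ih p, pvFm]
    · simp [h, ih b, pvFm]

theorem pvScanMin_cons (b : String × List Int) (l : List (String × List Int)) :
    pvScanMin (b :: l) = ((pvFm l b).1, some (pvKey (pvFm l b))) := by
  simp only [pvScanMin, List.foldl_cons, pvScanStep]
  exact pvScan_eq_fm l b

theorem pvFm_mem (l : List (String × List Int)) : ∀ b, pvFm l b ∈ b :: l := by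
  induction l with
  | nil => intro b; simp [pvFm]
  | cons p t ih =>
    intro b
    have hrw : pvFm (p :: t) b = pvFm t (if pvKey p < pvKey b then p else b) := by
      simp [pvFm]
    rw [hrw]
    by_cases h : pvKey p < pvKey b
    · rw [if_pos h]
      rcases List.mem_cons.mp (ih p) with h' | h' <;> simp [h']
    · rw [if_neg h]
      rcases List.mem_cons.mp (ih b) with h' | h' <;> simp [h']

theorem pvFm_append (l : List (String × List Int)) (x b : String × List Int) :
    pvFm (l ++ [x]) b = if pvKey x < pvKey (pvFm l b) then x else pvFm l b := by
  simp [pvFm, List.foldl_append]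

theorem pvEraseKey_eq_erase : ∀ (xs : List (String × List Int)) (m : String × List Int),
    m ∈ xs → (xs.map (fun p => p.1)).Nodup → pvEraseKey xs m.1 = xs.erase m := by
  intro xs
  induction xs with
  | nil => intro m hm; simp at hm
  | cons p t ih =>
    intro m hm hnd
    simp only [List.map_cons, List.nodup_cons] at hnd
    by_cases hk : p.1 = m.1
    · have hpm : p = m := by
        rcases List.mem_cons.mp hm with h | h
        · exact h.symm
        · exact absurd (hk ▸ List.mem_map_of_mem h) hnd.1
      simp [pvEraseKey, hpm, List.erase_cons_head]
    · have hpm : p ≠ m := fun h => hk (by rw [h])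
      have hm' : m ∈ t := by
        rcases List.mem_cons.mp hm with h | h
        · exact absurd h.symm hpm
        · exact h
      rw [List.erase_cons_tail (by simpa using hpm)]
      simp [pvEraseKey, hk, ih m hm' hnd.2]

theorem pvSorted_append_singleton (xs : List (String × List Int)) (x : String × List Int) :
    PySem.List.sorted (xs ++ [x]) pvKey false
      = PySem.List.insertBy (fun a b => decide (pvKey a < pvKey b)) x (PySem.List.sorted xs pvKey false) := by
  rw [PySem.List.sorted_eq_foldl_insertBy, PySem.List.sorted_eq_foldl_insertBy, List.foldl_append]
  rfl

-- selection order = stable sort order: the stable sort of a list b :: l is its first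
-- minimal element followed by the stable sort of the rest
theorem pvSel_sorted (l : List (String × List Int)) : ∀ b : String × List Int,
    ((b :: l).map (fun p => p.1)).Nodup →
    PySem.List.sorted (b :: l) pvKey false
      = pvFm l b :: PySem.List.sorted ((b :: l).erase (pvFm l b)) pvKey false := by
  induction l using List.reverseRecOn with
  | nil =>
    intro b _
    simp [pvFm, PySem.List.sorted, PySem.List.insertBy, List.erase_cons_head]
  | append_singleton ys x ih =>
    intro b hnd
    have hnd' : ((b :: ys).map (fun p => p.1)).Nodup := by
      have : (b :: ys).Sublist (b :: (ys ++ [x])) := by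
        refine List.cons_sublist_cons.mpr ?_
        exact (List.sublist_append_left ys [x])
      exact (this.map (fun p => p.1)).nodup hnd
    have hxnot : x ∉ b :: ys := by
      intro hx
      have h1 : x.1 ∈ (b :: ys).map (fun p => p.1) := List.mem_map_of_mem hx
      have : ¬ ((b :: ys).map (fun p => p.1) ++ [x.1]).Nodup := by
        intro h
        exact (List.disjoint_of_nodup_append h) h1 (by simp)
      exact this (by simpa using hnd)
    have hstep : PySem.List.sorted (b :: (ys ++ [x])) pvKey false
        = PySem.List.insertBy (fun a b => decide (pvKey a < pvKey b)) x
            (PySem.List.sorted (b :: ys) pvKey false) := by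
      have := pvSorted_append_singleton (b :: ys) x
      simpa using this
    rw [hstep, ih b hnd']
    by_cases h : pvKey x < pvKey (pvFm ys b)
    · rw [show PySem.List.insertBy (fun a b => decide (pvKey a < pvKey b)) x
            (pvFm ys b :: PySem.List.sorted ((b :: ys).erase (pvFm ys b)) pvKey false)
          = x :: pvFm ys b :: PySem.List.sorted ((b :: ys).erase (pvFm ys b)) pvKey false from by
        simp [PySem.List.insertBy, h]]
      have hfm : pvFm (ys ++ [x]) b = x := by rw [pvFm_append, if_pos h]
      rw [hfm]
      have herase : (b :: (ys ++ [x])).erase x = b :: ys := by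
        have : (b :: ys) ++ [x] = b :: (ys ++ [x]) := by simp
        rw [← this, List.erase_append_right _ hxnot]
        simp [List.erase_cons_head]
      rw [herase, ih b hnd']
    · rw [show PySem.List.insertBy (fun a b => decide (pvKey a < pvKey b)) x
            (pvFm ys b :: PySem.List.sorted ((b :: ys).erase (pvFm ys b)) pvKey false)
          = pvFm ys b :: PySem.List.insertBy (fun a b => decide (pvKey a < pvKey b)) x
              (PySem.List.sorted ((b :: ys).erase (pvFm ys b)) pvKey false) from by
        simp [PySem.List.insertBy, h]]
      have hfm : pvFm (ys ++ [x]) b = pvFm ys b := by rw [pvFm_append, if_neg h]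
      rw [hfm]
      have herase : (b :: (ys ++ [x])).erase (pvFm ys b)
          = ((b :: ys).erase (pvFm ys b)) ++ [x] := by
        have : (b :: ys) ++ [x] = b :: (ys ++ [x]) := by simp
        rw [← this, List.erase_append_left _ (pvFm_mem ys b)]
      rw [herase, pvSorted_append_singleton]

theorem pvLoopA_eq : ∀ (n : Nat) (pending acc : List (String × List Int)) (half c count : Int),
    pending.length = n → (pending.map (fun p => p.1)).Nodup →
    pvLoopA n pending acc half c count
      = acc ++ (PySem.List.enumerate (PySem.List.sorted pending pvKey false) count).map
          (fun p => (p.2.1, [c + p.1, c + p.1 + half])) := by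
  intro n
  induction n with
  | zero =>
    intro pending acc half c count hlen _
    have : pending = [] := List.length_eq_zero_iff.mp hlen
    subst this
    simp [pvLoopA, PySem.List.sorted]
  | succ k ih =>
    intro pending acc half c count hlen hnd
    cases pending with
    | nil => simp at hlen
    | cons b l =>
      have hm : pvFm l b ∈ b :: l := pvFm_mem l b
      have hkey : (pvScanMin (b :: l)).1 = (pvFm l b).1 := by rw [pvScanMin_cons]
      have herase : pvEraseKey (b :: l) (pvScanMin (b :: l)).1 = (b :: l).erase (pvFm l b) := by
        rw [hkey]; exact pvEraseKey_eq_erase (b :: l) (pvFm l b) hm hnd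
      have hnd' : (((b :: l).erase (pvFm l b)).map (fun p => p.1)).Nodup :=
        ((List.erase_sublist (l := b :: l) (a := pvFm l b)).map (fun p : String × List Int => p.1)).nodup hnd
      have hlen' : ((b :: l).erase (pvFm l b)).length = k := by
        rw [List.length_erase_of_mem hm]
        omega
      show pvLoopA (k + 1) (b :: l) acc half c count = _
      rw [pvLoopA]
      simp only [List.isEmpty_cons, if_neg (by simp : ¬ (false = true))]
      rw [herase, hkey, ih _ _ half c (count + 1) hlen' hnd']
      rw [pvSel_sorted l b hnd, PySem.List.enumerate_cons]
      simp

theorem pvKeys_nodup (leg_dict : List (String × List Int)) :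
    (((PySem.Dict.ofList leg_dict).items).map (fun p => p.1)).Nodup := by
  have := PySem.Dict.nodup_keys_ofList (κ := String) (ν := List Int) leg_dict
  simpa [PySem.Dict.keys] using this

-- ===== VERDICT (by name: the statement is the Claim_ definition above) =====
theorem find_new_leg_dict_py_spec : Claim_equal_find_new_leg_dict_py := by
  intro leg_dict c _ _
  unfold Spec_find_new_leg_dict_py find_new_leg_dict_py find_new_leg_dict_py_alt
  rw [pvLoopA_eq ((PySem.Dict.ofList leg_dict).items.length) _ _ _ _ _ rfl (pvKeys_nodup leg_dict)]
  simp
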